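-- pv_equiv track=rewrite | github.com/bctnry/chip8 | main_tkinter.py | disasm_s
-- ===== SOURCE A (Python) =====
-- def disasm_s(s: str, next_s: str = ''):
--     if not s: return ''
--     elif s == '00E0': return 'CLEAR_SCREEN'
--     elif s == '00EE': return 'RET'
--     elif s[0] == '1': return f'JMP 0x{s[1:]}'
--     elif s[0] == '2': return f'CALL 0x{s[1:]}'
--     elif s[0] == '3': return f'IF_NEQ V{s[1]},0x{s[2:]}: {disasm_s(next_s)}'
--     elif s[0] == '4': return f'IF_EQ V{s[1]},0x{s[2:]}: {disasm_s(next_s)}'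
--     elif s[0] == '5': return f'IF_NEQ V{s[1]},V{s[1]}: {disasm_s(next_s)}'
--     elif s[0] == '6': return f'LD V{s[1]},0x{s[2:]}'
--     elif s[0] == '7': return f'ADD V{s[1]},0x{s[2:]}'
--     elif s[0] == '8':
--         if s[3] == '0': return f'LD V{s[1]},V{s[2]}'
--         elif s[3] == '1': return f'OR V{s[1]},V{s[2]}'
--         elif s[3] == '2': return f'AND V{s[1]},V{s[2]}'
--         elif s[3] == '3': return f'XOR V{s[1]},V{s[2]}'
--         elif s[3] == '4': return f'ADDC V{s[1]},V{s[2]}'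
--         elif s[3] == '5': return f'SUBC V{s[1]},V{s[2]}'
--         elif s[3] == '6': return f'SHR V{s[1]},V{s[2]}'
--         elif s[3] == '7': return f'SUB2 V{s[1]},V{s[2]}'
--         elif s[3] == 'E': return f'SHL V{s[1]},V{s[2]}'
--     elif s[0] == '9': return f'IF_EQ V{s[1]},V{s[2]}: {disasm_s(next_s)}'
--     elif s[0] == 'A': return f'LDI 0x{s[1:]}'
--     elif s[0] == 'B': return f'JMP V0+0x{s[1:]}'
--     elif s[0] == 'C': return f'RANDOM V{s[1]},0x{s[2:]}'
--     elif s[0] == 'D': return f'DRAW V{s[1]},V{s[2]},0x{s[3]}'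
--     elif s[0] == 'E':
--         if s[2:] == '9E': return f'IF_NOTKEY V{s[1]}: {disasm_s(next_s)}'
--         elif s[2:] == 'A1': return f'IF_KEY V{s[1]}: {disasm_s(next_s)}'
--     elif s[0] == 'F':
--         if s[2:] == '07': return f'GET_DELAY V{s[1]}'
--         elif s[2:] == '0A': return f'WAITKEY V{s[1]}'
--         elif s[2:] == '15': return f'SET_DELAY V{s[1]}'
--         elif s[2:] == '18': return f'SET_SOUND V{s[1]}'
--         elif s[2:] == '1E': return f'ADD I,V{s[1]}'
--         elif s[2:] == '29': return f'CHAR V{s[1]}'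
--         elif s[2:] == '33': return f'BCD V{s[1]}'
--         elif s[2:] == '55': return f'STR {s[1]}'
--         elif s[2:] == '65': return f'LDR {s[1]}'
--     return '<UNSPECIFIED>'
-- ===== SOURCE B (Python) =====
-- # Generic pattern-matching disassembler: a single data table of
-- # (wildcard pattern, output template) rules interpreted by one tiny matcher
-- # and one tiny template renderer, instead of A's hard-coded branch chain.
-- # Pattern language: '?' matches any one char, a trailing '*' matches any rest,
-- # otherwise chars must match exactly and lengths must agree.
-- # Template language: '{k}' -> s[k], '{k:}' -> s[k:], '{next}' -> disasm_s(next_s).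
--
-- RULES = [
--     ('',     ''),
--     ('00E0', 'CLEAR_SCREEN'),
--     ('00EE', 'RET'),
--     ('1*',   'JMP 0x{1:}'),
--     ('2*',   'CALL 0x{1:}'),
--     ('3*',   'IF_NEQ V{1},0x{2:}: {next}'),
--     ('4*',   'IF_EQ V{1},0x{2:}: {next}'),
--     ('5*',   'IF_NEQ V{1},V{1}: {next}'),
--     ('6*',   'LD V{1},0x{2:}'),
--     ('7*',   'ADD V{1},0x{2:}'),
--     ('8??0*', 'LD V{1},V{2}'),
--     ('8??1*', 'OR V{1},V{2}'),
--     ('8??2*', 'AND V{1},V{2}'),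
--     ('8??3*', 'XOR V{1},V{2}'),
--     ('8??4*', 'ADDC V{1},V{2}'),
--     ('8??5*', 'SUBC V{1},V{2}'),
--     ('8??6*', 'SHR V{1},V{2}'),
--     ('8??7*', 'SUB2 V{1},V{2}'),
--     ('8??E*', 'SHL V{1},V{2}'),
--     ('9*',   'IF_EQ V{1},V{2}: {next}'),
--     ('A*',   'LDI 0x{1:}'),
--     ('B*',   'JMP V0+0x{1:}'),
--     ('C*',   'RANDOM V{1},0x{2:}'),
--     ('D*',   'DRAW V{1},V{2},0x{3}'),
--     ('E?9E', 'IF_NOTKEY V{1}: {next}'),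
--     ('E?A1', 'IF_KEY V{1}: {next}'),
--     ('F?07', 'GET_DELAY V{1}'),
--     ('F?0A', 'WAITKEY V{1}'),
--     ('F?15', 'SET_DELAY V{1}'),
--     ('F?18', 'SET_SOUND V{1}'),
--     ('F?1E', 'ADD I,V{1}'),
--     ('F?29', 'CHAR V{1}'),
--     ('F?33', 'BCD V{1}'),
--     ('F?55', 'STR {1}'),
--     ('F?65', 'LDR {1}'),
-- ]
--
-- def _match(p, s):
--     i = 0
--     while i < len(p):
--         if p[i] == '*':
--             return True
--         if i >= len(s) or (p[i] != '?' and p[i] != s[i]):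
--             return False
--         i += 1
--     return i == len(s)
--
-- def _render(t, s, next_s):
--     out = []
--     i = 0
--     while i < len(t):
--         if t[i] == '{':
--             j = t.index('}', i)
--             tok = t[i + 1:j]
--             if tok == 'next':
--                 out.append(disasm_s(next_s))
--             elif tok.endswith(':'):
--                 out.append(s[int(tok[:-1]):])
--             else:
--                 out.append(s[int(tok)])
--             i = j + 1
--         else:
--             out.append(t[i])
--             i += 1
--     return ''.join(out)
--
-- def disasm_s(s: str, next_s: str = ''):
--     for p, t in RULES:
--         if _match(p, s):
--             return _render(t, s, next_s)
--     return '<UNSPECIFIED>'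
-- ===== Notes on version B (the rewrite author's own statement) =====
-- stated objective: alternative
-- what changed: Replaced A's 30-branch hard-coded if/elif chain by a declarative data table of (wildcard pattern, output template) rules interpreted by one generic matcher and one generic template renderer.
import Mathlib
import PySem

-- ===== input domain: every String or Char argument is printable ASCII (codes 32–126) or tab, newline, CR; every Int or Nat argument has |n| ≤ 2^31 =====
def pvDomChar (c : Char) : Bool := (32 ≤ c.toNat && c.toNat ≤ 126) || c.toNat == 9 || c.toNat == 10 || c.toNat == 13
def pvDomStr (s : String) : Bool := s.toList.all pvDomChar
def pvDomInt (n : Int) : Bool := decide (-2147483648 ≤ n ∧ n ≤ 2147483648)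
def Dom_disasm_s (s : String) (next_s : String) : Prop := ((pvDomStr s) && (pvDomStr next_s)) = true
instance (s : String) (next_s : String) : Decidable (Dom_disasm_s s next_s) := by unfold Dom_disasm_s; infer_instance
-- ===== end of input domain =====

-- B replaces A's hard-coded 30-branch dispatch by a single declarative data table of
-- (wildcard pattern, output template) rules interpreted by one generic matcher and one
-- generic template renderer (objective: alternative, same cost).
-- Both ports work on List Char; 'none' models Python raising (IndexError/ValueError).
-- Recursion depth of disasm_s is at most 2 (the inner call passes next_s = '' which
-- returns immediately), so each port takes the recursive call as an explicit 'rec'.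

-- ===== PORT A =====
-- literal transliteration of A's if/elif chain; f-string concatenation is represented
-- at the character-list level; s[i] → PySem.List.pyGet?, s[a:] → PySem.List.slice.
def runA (s next : List Char) (rec : List Char → Option (List Char)) : Option (List Char) :=
  if s = [] then some []
  else if s = ['0','0','E','0'] then some ['C','L','E','A','R','_','S','C','R','E','E','N']
  else if s = ['0','0','E','E'] then some ['R','E','T']
  else
    match s[0]? with
    | none => none
    | some c0 =>
      if c0 = '1' then some (['J','M','P',' ','0','x'] ++ PySem.List.slice s (some 1) none)
      else if c0 = '2' then some (['C','A','L','L',' ','0','x'] ++ PySem.List.slice s (some 1) none)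
      else if c0 = '3' then do
        let c1 ← PySem.List.pyGet? s 1
        let r ← rec next
        pure (['I','F','_','N','E','Q',' ','V'] ++ [c1] ++ [',','0','x'] ++ PySem.List.slice s (some 2) none ++ [':',' '] ++ r)
      else if c0 = '4' then do
        let c1 ← PySem.List.pyGet? s 1
        let r ← rec next
        pure (['I','F','_','E','Q',' ','V'] ++ [c1] ++ [',','0','x'] ++ PySem.List.slice s (some 2) none ++ [':',' '] ++ r)
      else if c0 = '5' then do
        let c1 ← PySem.List.pyGet? s 1
        let r ← rec next
        pure (['I','F','_','N','E','Q',' ','V'] ++ [c1] ++ [',','V'] ++ [c1] ++ [':',' '] ++ r)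
      else if c0 = '6' then do
        let c1 ← PySem.List.pyGet? s 1
        pure (['L','D',' ','V'] ++ [c1] ++ [',','0','x'] ++ PySem.List.slice s (some 2) none)
      else if c0 = '7' then do
        let c1 ← PySem.List.pyGet? s 1
        pure (['A','D','D',' ','V'] ++ [c1] ++ [',','0','x'] ++ PySem.List.slice s (some 2) none)
      else if c0 = '8' then
        match PySem.List.pyGet? s 3 with
        | none => none
        | some c3 =>
          if c3 = '0' then do
          let c1 ← PySem.List.pyGet? s 1
          let c2 ← PySem.List.pyGet? s 2
          pure (['L','D',' ','V'] ++ [c1] ++ [',','V'] ++ [c2])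
          else if c3 = '1' then do
          let c1 ← PySem.List.pyGet? s 1
          let c2 ← PySem.List.pyGet? s 2
          pure (['O','R',' ','V'] ++ [c1] ++ [',','V'] ++ [c2])
          else if c3 = '2' then do
          let c1 ← PySem.List.pyGet? s 1
          let c2 ← PySem.List.pyGet? s 2
          pure (['A','N','D',' ','V'] ++ [c1] ++ [',','V'] ++ [c2])
          else if c3 = '3' then do
          let c1 ← PySem.List.pyGet? s 1
          let c2 ← PySem.List.pyGet? s 2
          pure (['X','O','R',' ','V'] ++ [c1] ++ [',','V'] ++ [c2])
          else if c3 = '4' then do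
          let c1 ← PySem.List.pyGet? s 1
          let c2 ← PySem.List.pyGet? s 2
          pure (['A','D','D','C',' ','V'] ++ [c1] ++ [',','V'] ++ [c2])
          else if c3 = '5' then do
          let c1 ← PySem.List.pyGet? s 1
          let c2 ← PySem.List.pyGet? s 2
          pure (['S','U','B','C',' ','V'] ++ [c1] ++ [',','V'] ++ [c2])
          else if c3 = '6' then do
          let c1 ← PySem.List.pyGet? s 1
          let c2 ← PySem.List.pyGet? s 2
          pure (['S','H','R',' ','V'] ++ [c1] ++ [',','V'] ++ [c2])
          else if c3 = '7' then do
          let c1 ← PySem.List.pyGet? s 1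
          let c2 ← PySem.List.pyGet? s 2
          pure (['S','U','B','2',' ','V'] ++ [c1] ++ [',','V'] ++ [c2])
          else if c3 = 'E' then do
          let c1 ← PySem.List.pyGet? s 1
          let c2 ← PySem.List.pyGet? s 2
          pure (['S','H','L',' ','V'] ++ [c1] ++ [',','V'] ++ [c2])
          else some ['<','U','N','S','P','E','C','I','F','I','E','D','>']
      else if c0 = '9' then do
        let c1 ← PySem.List.pyGet? s 1
        let c2 ← PySem.List.pyGet? s 2
        let r ← rec next
        pure (['I','F','_','E','Q',' ','V'] ++ [c1] ++ [',','V'] ++ [c2] ++ [':',' '] ++ r)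
      else if c0 = 'A' then some (['L','D','I',' ','0','x'] ++ PySem.List.slice s (some 1) none)
      else if c0 = 'B' then some (['J','M','P',' ','V','0','+','0','x'] ++ PySem.List.slice s (some 1) none)
      else if c0 = 'C' then do
        let c1 ← PySem.List.pyGet? s 1
        pure (['R','A','N','D','O','M',' ','V'] ++ [c1] ++ [',','0','x'] ++ PySem.List.slice s (some 2) none)
      else if c0 = 'D' then do
        let c1 ← PySem.List.pyGet? s 1
        let c2 ← PySem.List.pyGet? s 2
        let c3 ← PySem.List.pyGet? s 3
        pure (['D','R','A','W',' ','V'] ++ [c1] ++ [',','V'] ++ [c2] ++ [',','0','x'] ++ [c3])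
      else if c0 = 'E' then
        if PySem.List.slice s (some 2) none = ['9','E'] then do
        let c1 ← PySem.List.pyGet? s 1
        let r ← rec next
        pure (['I','F','_','N','O','T','K','E','Y',' ','V'] ++ [c1] ++ [':',' '] ++ r)
        else if PySem.List.slice s (some 2) none = ['A','1'] then do
        let c1 ← PySem.List.pyGet? s 1
        let r ← rec next
        pure (['I','F','_','K','E','Y',' ','V'] ++ [c1] ++ [':',' '] ++ r)
        else some ['<','U','N','S','P','E','C','I','F','I','E','D','>']
      else if c0 = 'F' then
        if PySem.List.slice s (some 2) none = ['0','7'] then do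
        let c1 ← PySem.List.pyGet? s 1
        pure (['G','E','T','_','D','E','L','A','Y',' ','V'] ++ [c1])
        else if PySem.List.slice s (some 2) none = ['0','A'] then do
        let c1 ← PySem.List.pyGet? s 1
        pure (['W','A','I','T','K','E','Y',' ','V'] ++ [c1])
        else if PySem.List.slice s (some 2) none = ['1','5'] then do
        let c1 ← PySem.List.pyGet? s 1
        pure (['S','E','T','_','D','E','L','A','Y',' ','V'] ++ [c1])
        else if PySem.List.slice s (some 2) none = ['1','8'] then do
        let c1 ← PySem.List.pyGet? s 1
        pure (['S','E','T','_','S','O','U','N','D',' ','V'] ++ [c1])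
        else if PySem.List.slice s (some 2) none = ['1','E'] then do
        let c1 ← PySem.List.pyGet? s 1
        pure (['A','D','D',' ','I',',','V'] ++ [c1])
        else if PySem.List.slice s (some 2) none = ['2','9'] then do
        let c1 ← PySem.List.pyGet? s 1
        pure (['C','H','A','R',' ','V'] ++ [c1])
        else if PySem.List.slice s (some 2) none = ['3','3'] then do
        let c1 ← PySem.List.pyGet? s 1
        pure (['B','C','D',' ','V'] ++ [c1])
        else if PySem.List.slice s (some 2) none = ['5','5'] then do
        let c1 ← PySem.List.pyGet? s 1
        pure (['S','T','R',' '] ++ [c1])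
        else if PySem.List.slice s (some 2) none = ['6','5'] then do
        let c1 ← PySem.List.pyGet? s 1
        pure (['L','D','R',' '] ++ [c1])
        else some ['<','U','N','S','P','E','C','I','F','I','E','D','>']
      else some ['<','U','N','S','P','E','C','I','F','I','E','D','>']
def disasm_s (s : String) (next_s : String) : Option String :=
  (runA s.toList next_s.toList (fun t => runA t [] (fun _ => some []))).map String.ofList

-- ===== PORT B =====
-- transliteration of Source B: the RULES table of (pattern, template) strings as char
-- lists, the generic matcher _match (loop → structural recursion dropping one char of
-- pattern and subject per step, exact) and the generic renderer _render (index loop →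
-- recursion on the template; t.index('}') → takeWhile/dropWhile on '}', with none for
-- Python's ValueError when '}' is absent; int(tok) → PySem.Int.ofStr?, s[i] →
-- PySem.List.pyGet?, s[i:] → PySem.List.slice, tok.endswith(':') → getLast?).
def rulesB : List (List Char × List Char) := [
  ([], []),
  (['0','0','E','0'], ['C','L','E','A','R','_','S','C','R','E','E','N']),
  (['0','0','E','E'], ['R','E','T']),
  (['1','*'], ['J','M','P',' ','0','x','{','1',':','}']),
  (['2','*'], ['C','A','L','L',' ','0','x','{','1',':','}']),
  (['3','*'], ['I','F','_','N','E','Q',' ','V','{','1','}',',','0','x','{','2',':','}',':',' ','{','n','e','x','t','}']),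
  (['4','*'], ['I','F','_','E','Q',' ','V','{','1','}',',','0','x','{','2',':','}',':',' ','{','n','e','x','t','}']),
  (['5','*'], ['I','F','_','N','E','Q',' ','V','{','1','}',',','V','{','1','}',':',' ','{','n','e','x','t','}']),
  (['6','*'], ['L','D',' ','V','{','1','}',',','0','x','{','2',':','}']),
  (['7','*'], ['A','D','D',' ','V','{','1','}',',','0','x','{','2',':','}']),
  (['8','?','?','0','*'], ['L','D',' ','V','{','1','}',',','V','{','2','}']),
  (['8','?','?','1','*'], ['O','R',' ','V','{','1','}',',','V','{','2','}']),
  (['8','?','?','2','*'], ['A','N','D',' ','V','{','1','}',',','V','{','2','}']),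
  (['8','?','?','3','*'], ['X','O','R',' ','V','{','1','}',',','V','{','2','}']),
  (['8','?','?','4','*'], ['A','D','D','C',' ','V','{','1','}',',','V','{','2','}']),
  (['8','?','?','5','*'], ['S','U','B','C',' ','V','{','1','}',',','V','{','2','}']),
  (['8','?','?','6','*'], ['S','H','R',' ','V','{','1','}',',','V','{','2','}']),
  (['8','?','?','7','*'], ['S','U','B','2',' ','V','{','1','}',',','V','{','2','}']),
  (['8','?','?','E','*'], ['S','H','L',' ','V','{','1','}',',','V','{','2','}']),
  (['9','*'], ['I','F','_','E','Q',' ','V','{','1','}',',','V','{','2','}',':',' ','{','n','e','x','t','}']),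
  (['A','*'], ['L','D','I',' ','0','x','{','1',':','}']),
  (['B','*'], ['J','M','P',' ','V','0','+','0','x','{','1',':','}']),
  (['C','*'], ['R','A','N','D','O','M',' ','V','{','1','}',',','0','x','{','2',':','}']),
  (['D','*'], ['D','R','A','W',' ','V','{','1','}',',','V','{','2','}',',','0','x','{','3','}']),
  (['E','?','9','E'], ['I','F','_','N','O','T','K','E','Y',' ','V','{','1','}',':',' ','{','n','e','x','t','}']),
  (['E','?','A','1'], ['I','F','_','K','E','Y',' ','V','{','1','}',':',' ','{','n','e','x','t','}']),
  (['F','?','0','7'], ['G','E','T','_','D','E','L','A','Y',' ','V','{','1','}']),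
  (['F','?','0','A'], ['W','A','I','T','K','E','Y',' ','V','{','1','}']),
  (['F','?','1','5'], ['S','E','T','_','D','E','L','A','Y',' ','V','{','1','}']),
  (['F','?','1','8'], ['S','E','T','_','S','O','U','N','D',' ','V','{','1','}']),
  (['F','?','1','E'], ['A','D','D',' ','I',',','V','{','1','}']),
  (['F','?','2','9'], ['C','H','A','R',' ','V','{','1','}']),
  (['F','?','3','3'], ['B','C','D',' ','V','{','1','}']),
  (['F','?','5','5'], ['S','T','R',' ','{','1','}']),
  (['F','?','6','5'], ['L','D','R',' ','{','1','}'])]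

def matchB : List Char → List Char → Bool
  | [], s => decide (s = [])
  | p :: ps, s =>
    if p = '*' then true
    else
      match s with
      | [] => false
      | c :: cs => (decide (p = '?') || decide (p = c)) && matchB ps cs

def renderB (s next : List Char) (rec : List Char → Option (List Char)) :
    List Char → Option (List Char)
  | [] => some []
  | c :: rest =>
    if c = '{' then
      if h : rest.dropWhile (· ≠ '}') = [] then none   -- t.index('}') raises ValueError
      else
        let tok := rest.takeWhile (· ≠ '}')
        let rest2 := (rest.dropWhile (· ≠ '}')).tail
        if tok = ['n','e','x','t'] then do
          let r ← rec next
          let tl ← renderB s next rec rest2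
          pure (r ++ tl)
        else if tok.getLast? = some ':' then do
          let n ← PySem.Int.ofStr? (String.ofList tok.dropLast)
          let tl ← renderB s next rec rest2
          pure (PySem.List.slice s (some n) none ++ tl)
        else do
          let n ← PySem.Int.ofStr? (String.ofList tok)
          let ch ← PySem.List.pyGet? s n
          let tl ← renderB s next rec rest2
          pure (ch :: tl)
    else do
      let tl ← renderB s next rec rest
      pure (c :: tl)
  termination_by t => t.length
  decreasing_by
  all_goals simp
  all_goals
    (have h1 : (List.dropWhile (fun x => !decide (x = '}')) rest).length ≤ rest.length :=
      List.length_dropWhile_le _ _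
     omega)

def firstRule (s : List Char) : List (List Char × List Char) → Option (List Char)
  | [] => none
  | (p, t) :: rs => if matchB p s then some t else firstRule s rs

def runB (s next : List Char) (rec : List Char → Option (List Char)) : Option (List Char) :=
  match firstRule s rulesB with
  | some t => renderB s next rec t
  | none => some ['<','U','N','S','P','E','C','I','F','I','E','D','>']

def disasm_s_alt (s : String) (next_s : String) : Option String :=
  (runB s.toList next_s.toList (fun t => runB t [] (fun _ => some []))).map String.ofList

-- ===== PRECONDITION & SPEC =====
-- Pre_ excludes exactly the inputs on which Python A raises IndexError: opcodes too
-- short for the registers/nibbles their leading nibble makes A index (s[1]/s[2]/s[3]),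
-- including the same condition on next_s when the opcode triggers the recursive call.
def pyRet1 (t : List Char) : Bool :=
  match t with
  | [] => true
  | c :: _ =>
    if c = '3' ∨ c = '4' ∨ c = '5' ∨ c = '6' ∨ c = '7' ∨ c = 'C' then decide (2 ≤ t.length)
    else if c = '9' then decide (3 ≤ t.length)
    else if c = '8' ∨ c = 'D' then decide (4 ≤ t.length)
    else true

def preL (s n : List Char) : Bool :=
  match s with
  | [] => true
  | c :: _ =>
    if c = '3' ∨ c = '4' ∨ c = '5' then decide (2 ≤ s.length) && pyRet1 n
    else if c = '6' ∨ c = '7' ∨ c = 'C' then decide (2 ≤ s.length)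
    else if c = '8' ∨ c = 'D' then decide (4 ≤ s.length)
    else if c = '9' then decide (3 ≤ s.length) && pyRet1 n
    else if c = 'E' then
      (if PySem.List.slice s (some 2) none = ['9','E'] ∨
          PySem.List.slice s (some 2) none = ['A','1'] then pyRet1 n else true)
    else true

def Pre_disasm_s (s : String) (next_s : String) : Prop := preL s.toList next_s.toList = true
instance (s : String) (next_s : String) : Decidable (Pre_disasm_s s next_s) := by unfold Pre_disasm_s; infer_instance

def pvWitness_disasm_s : String × String := ("8AB2", "1FFF")

def Spec_disasm_s (s : String) (next_s : String) (out : Option String) : Prop := out = disasm_s_alt s next_s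
instance (s : String) (next_s : String) (out : Option String) : Decidable (Spec_disasm_s s next_s out) := by unfold Spec_disasm_s; infer_instance

-- ===== CLAIM (what is proved, stated in full; the proofs are below) =====
def Claim_equal_disasm_s : Prop := ∀ (s : String) (next_s : String), Dom_disasm_s s next_s → Pre_disasm_s s next_s → Spec_disasm_s s next_s (disasm_s s next_s)

-- ===== LEMMAS AND PROOFS =====

set_option maxHeartbeats 4000000

-- numeral index/slice evaluation helpers
theorem pyGet_one (a b : Char) (l : List Char) : PySem.List.pyGet? (a :: b :: l) 1 = some b := by
  rw [show (1:Int) = ((1:Nat):Int) by norm_num, PySem.List.pyGet?_natCast]; rfl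
theorem pyGet_two (a b c : Char) (l : List Char) : PySem.List.pyGet? (a :: b :: c :: l) 2 = some c := by
  rw [show (2:Int) = ((2:Nat):Int) by norm_num, PySem.List.pyGet?_natCast]; rfl
theorem pyGet_three (a b c d : Char) (l : List Char) : PySem.List.pyGet? (a :: b :: c :: d :: l) 3 = some d := by
  rw [show (3:Int) = ((3:Nat):Int) by norm_num, PySem.List.pyGet?_natCast]; rfl
theorem slice_from_two (l : List Char) : PySem.List.slice l (some 2) none = l.drop 2 := by
  rw [show (2:Int) = ((2:Nat):Int) by norm_num, PySem.List.slice_from_natCast]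
theorem ofStr_one : PySem.Int.ofStr? "1" = some 1 := by decide
theorem ofStr_two : PySem.Int.ofStr? "2" = some 2 := by decide
theorem ofStr_three : PySem.Int.ofStr? "3" = some 3 := by decide

-- evaluation lemmas for the generic matcher
theorem matchB_star (ps s : List Char) : matchB ('*'::ps) s = true := by simp [matchB]
theorem matchB_q (ps : List Char) (c : Char) (cs : List Char) : matchB ('?'::ps) (c::cs) = matchB ps cs := by
  simp [matchB]
theorem matchB_eq (a : Char) (ps cs : List Char) (h1 : a ≠ '*') : matchB (a::ps) (a::cs) = matchB ps cs := by
  simp [matchB, h1]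
theorem matchB_ne (a c : Char) (ps cs : List Char) (h1 : a ≠ '*') (h2 : a ≠ '?') (h3 : ¬ a = c) :
    matchB (a::ps) (c::cs) = false := by simp [matchB, h1, h2, h3]
theorem matchB_nil (s : List Char) : matchB [] s = decide (s = []) := rfl
theorem matchB_cons_nil (a : Char) (ps : List Char) (h : a ≠ '*') : matchB (a::ps) [] = false := by
  simp [matchB, h]

-- a pattern without wildcards matches exactly itself
theorem matchB_noWild (p : List Char) (hs : '*' ∉ p) (hq : '?' ∉ p) (s : List Char) :
    matchB p s = decide (s = p) := by
  induction p generalizing s with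
  | nil => simp [matchB]
  | cons a ps ih =>
    simp only [List.mem_cons, not_or] at hs hq
    cases s with
    | nil => simp [matchB, Ne.symm hs.1]
    | cons c cs =>
      by_cases h : a = c
      · subst h; simp [matchB, Ne.symm hs.1, Ne.symm hq.1, ih hs.2 hq.2]
      · simp [matchB, Ne.symm hs.1, Ne.symm hq.1, ih hs.2 hq.2, h, Ne.symm h]

theorem pyRet1_preL (t : List Char) (h : pyRet1 t = true) : preL t [] = true := by
  cases t with
  | nil => rfl
  | cons c r =>
    simp only [pyRet1] at h
    simp only [preL]
    split_ifs at h ⊢ with h1 h2 h3 h4 h5 h6 h7 h8 h9 <;>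
      simp_all [pyRet1] <;> omega

theorem run_eq (s next : List Char) (recA recB : List Char → Option (List Char))
    (hrec : pyRet1 next = true → recA next = recB next)
    (h : preL s next = true) :
    runA s next recA = runB s next recB := by
  cases s with
  | nil =>
    simp [runA, runB, firstRule, rulesB, matchB_star, matchB_q, matchB_eq, matchB_ne,
      matchB_nil, matchB_cons_nil, renderB]
  | cons c0 rest =>
    by_cases e0 : c0 = '0'
    · subst e0
      by_cases h1 : rest = ['0','E','0']
      · subst h1
        simp [runA, runB, firstRule, rulesB, matchB_star, matchB_q, matchB_eq, matchB_ne,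
          matchB_nil, matchB_cons_nil, renderB]
      · by_cases h2 : rest = ['0','E','E']
        · subst h2
          simp [runA, runB, firstRule, rulesB, matchB_star, matchB_q, matchB_eq, matchB_ne,
            matchB_nil, matchB_cons_nil, renderB]
        · have m1 : matchB ['0','E','0'] rest = false := by rw [matchB_noWild] <;> simp [h1]
          have m2 : matchB ['0','E','E'] rest = false := by rw [matchB_noWild] <;> simp [h2]
          simp [runA, runB, firstRule, rulesB, matchB_star, matchB_q, matchB_eq, matchB_ne,
            matchB_nil, matchB_cons_nil, renderB, h1, h2, m1, m2]
    by_cases e1 : c0 = '1'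
    · subst e1
      simp [runA, runB, firstRule, rulesB, matchB_star, matchB_q, matchB_eq, matchB_ne,
        matchB_nil, matchB_cons_nil, renderB, ofStr_one, PySem.List.slice_from_one]
    by_cases e2 : c0 = '2'
    · subst e2
      simp [runA, runB, firstRule, rulesB, matchB_star, matchB_q, matchB_eq, matchB_ne,
        matchB_nil, matchB_cons_nil, renderB, ofStr_one, PySem.List.slice_from_one]
    by_cases e3 : c0 = '3'
    · subst e3
      simp [preL] at h
      cases rest with
      | nil => simp at h <;> omega
      | cons c1 rest2 =>
        have hr := hrec h.2
        simp [runA, runB, firstRule, rulesB, matchB_star, matchB_q, matchB_eq, matchB_ne,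
          matchB_nil, matchB_cons_nil, renderB, ofStr_one, ofStr_two, hr,
          pyGet_one, slice_from_two]
        cases recB next <;> simp
    by_cases e4 : c0 = '4'
    · subst e4
      simp [preL] at h
      cases rest with
      | nil => simp at h <;> omega
      | cons c1 rest2 =>
        have hr := hrec h.2
        simp [runA, runB, firstRule, rulesB, matchB_star, matchB_q, matchB_eq, matchB_ne,
          matchB_nil, matchB_cons_nil, renderB, ofStr_one, ofStr_two, hr,
          pyGet_one, slice_from_two]
        cases recB next <;> simp
    by_cases e5 : c0 = '5'
    · subst e5
      simp [preL] at h
      cases rest with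
      | nil => simp at h <;> omega
      | cons c1 rest2 =>
        have hr := hrec h.2
        simp [runA, runB, firstRule, rulesB, matchB_star, matchB_q, matchB_eq, matchB_ne,
          matchB_nil, matchB_cons_nil, renderB, ofStr_one, hr, pyGet_one]
        cases recB next <;> simp
    by_cases e6 : c0 = '6'
    · subst e6
      simp [preL] at h
      cases rest with
      | nil => simp at h <;> omega
      | cons c1 rest2 =>
        simp [runA, runB, firstRule, rulesB, matchB_star, matchB_q, matchB_eq, matchB_ne,
          matchB_nil, matchB_cons_nil, renderB, ofStr_one, ofStr_two, pyGet_one, slice_from_two]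
    by_cases e7 : c0 = '7'
    · subst e7
      simp [preL] at h
      cases rest with
      | nil => simp at h <;> omega
      | cons c1 rest2 =>
        simp [runA, runB, firstRule, rulesB, matchB_star, matchB_q, matchB_eq, matchB_ne,
          matchB_nil, matchB_cons_nil, renderB, ofStr_one, ofStr_two, pyGet_one, slice_from_two]
    by_cases e8 : c0 = '8'
    · subst e8
      simp [preL] at h
      cases rest with
      | nil => simp at h <;> omega
      | cons c1 rest2 =>
      cases rest2 with
      | nil => simp at h <;> omega
      | cons c2 rest3 =>
      cases rest3 with
      | nil => simp at h <;> omega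
      | cons c3 rest4 =>
        by_cases k0 : c3 = '0'
        · subst k0
          simp [runA, runB, firstRule, rulesB, matchB_star, matchB_q, matchB_eq, matchB_ne,
            matchB_nil, matchB_cons_nil, renderB, ofStr_one, ofStr_two,
            pyGet_one, pyGet_two, pyGet_three]
        by_cases k1 : c3 = '1'
        · subst k1
          simp [runA, runB, firstRule, rulesB, matchB_star, matchB_q, matchB_eq, matchB_ne,
            matchB_nil, matchB_cons_nil, renderB, ofStr_one, ofStr_two,
            pyGet_one, pyGet_two, pyGet_three]
        by_cases k2 : c3 = '2'
        · subst k2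
          simp [runA, runB, firstRule, rulesB, matchB_star, matchB_q, matchB_eq, matchB_ne,
            matchB_nil, matchB_cons_nil, renderB, ofStr_one, ofStr_two,
            pyGet_one, pyGet_two, pyGet_three]
        by_cases k3 : c3 = '3'
        · subst k3
          simp [runA, runB, firstRule, rulesB, matchB_star, matchB_q, matchB_eq, matchB_ne,
            matchB_nil, matchB_cons_nil, renderB, ofStr_one, ofStr_two,
            pyGet_one, pyGet_two, pyGet_three]
        by_cases k4 : c3 = '4'
        · subst k4
          simp [runA, runB, firstRule, rulesB, matchB_star, matchB_q, matchB_eq, matchB_ne,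
            matchB_nil, matchB_cons_nil, renderB, ofStr_one, ofStr_two,
            pyGet_one, pyGet_two, pyGet_three]
        by_cases k5 : c3 = '5'
        · subst k5
          simp [runA, runB, firstRule, rulesB, matchB_star, matchB_q, matchB_eq, matchB_ne,
            matchB_nil, matchB_cons_nil, renderB, ofStr_one, ofStr_two,
            pyGet_one, pyGet_two, pyGet_three]
        by_cases k6 : c3 = '6'
        · subst k6
          simp [runA, runB, firstRule, rulesB, matchB_star, matchB_q, matchB_eq, matchB_ne,
            matchB_nil, matchB_cons_nil, renderB, ofStr_one, ofStr_two,
            pyGet_one, pyGet_two, pyGet_three]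
        by_cases k7 : c3 = '7'
        · subst k7
          simp [runA, runB, firstRule, rulesB, matchB_star, matchB_q, matchB_eq, matchB_ne,
            matchB_nil, matchB_cons_nil, renderB, ofStr_one, ofStr_two,
            pyGet_one, pyGet_two, pyGet_three]
        by_cases kE : c3 = 'E'
        · subst kE
          simp [runA, runB, firstRule, rulesB, matchB_star, matchB_q, matchB_eq, matchB_ne,
            matchB_nil, matchB_cons_nil, renderB, ofStr_one, ofStr_two,
            pyGet_one, pyGet_two, pyGet_three]
        · simp [runA, runB, firstRule, rulesB, matchB_star, matchB_q, matchB_eq, matchB_ne,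
            matchB_nil, matchB_cons_nil, renderB, pyGet_three,
            k0, k1, k2, k3, k4, k5, k6, k7, kE,
            Ne.symm k0, Ne.symm k1, Ne.symm k2, Ne.symm k3, Ne.symm k4,
            Ne.symm k5, Ne.symm k6, Ne.symm k7, Ne.symm kE]
    by_cases e9 : c0 = '9'
    · subst e9
      simp [preL] at h
      cases rest with
      | nil => simp at h <;> omega
      | cons c1 rest2 =>
      cases rest2 with
      | nil => simp at h <;> omega
      | cons c2 rest3 =>
        have hr := hrec h.2
        simp [runA, runB, firstRule, rulesB, matchB_star, matchB_q, matchB_eq, matchB_ne,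
          matchB_nil, matchB_cons_nil, renderB, ofStr_one, ofStr_two, hr,
          pyGet_one, pyGet_two]
        cases recB next <;> simp
    by_cases eA : c0 = 'A'
    · subst eA
      simp [runA, runB, firstRule, rulesB, matchB_star, matchB_q, matchB_eq, matchB_ne,
        matchB_nil, matchB_cons_nil, renderB, ofStr_one, PySem.List.slice_from_one]
    by_cases eB : c0 = 'B'
    · subst eB
      simp [runA, runB, firstRule, rulesB, matchB_star, matchB_q, matchB_eq, matchB_ne,
        matchB_nil, matchB_cons_nil, renderB, ofStr_one, PySem.List.slice_from_one]
    by_cases eC : c0 = 'C'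
    · subst eC
      simp [preL] at h
      cases rest with
      | nil => simp at h <;> omega
      | cons c1 rest2 =>
        simp [runA, runB, firstRule, rulesB, matchB_star, matchB_q, matchB_eq, matchB_ne,
          matchB_nil, matchB_cons_nil, renderB, ofStr_one, ofStr_two, pyGet_one, slice_from_two]
    by_cases eD : c0 = 'D'
    · subst eD
      simp [preL] at h
      cases rest with
      | nil => simp at h <;> omega
      | cons c1 rest2 =>
      cases rest2 with
      | nil => simp at h <;> omega
      | cons c2 rest3 =>
      cases rest3 with
      | nil => simp at h <;> omega
      | cons c3 rest4 =>
        simp [runA, runB, firstRule, rulesB, matchB_star, matchB_q, matchB_eq, matchB_ne,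
          matchB_nil, matchB_cons_nil, renderB, ofStr_one, ofStr_two, ofStr_three,
          pyGet_one, pyGet_two, pyGet_three]
    by_cases eE : c0 = 'E'
    · subst eE
      cases rest with
      | nil =>
        simp [runA, runB, firstRule, rulesB, matchB_star, matchB_q, matchB_eq, matchB_ne,
          matchB_nil, matchB_cons_nil, renderB, slice_from_two]
      | cons c1 rest2 =>
        by_cases h9 : rest2 = ['9','E']
        · subst h9
          have hpy : pyRet1 next = true := by
            simp [preL, slice_from_two] at h
            exact h
          have hr := hrec hpy
          simp [runA, runB, firstRule, rulesB, matchB_star, matchB_q, matchB_eq, matchB_ne,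
            matchB_nil, matchB_cons_nil, renderB, ofStr_one, hr, pyGet_one, slice_from_two]
          cases recB next <;> simp
        · by_cases hA : rest2 = ['A','1']
          · subst hA
            have hpy : pyRet1 next = true := by
              simp [preL, slice_from_two] at h
              exact h
            have hr := hrec hpy
            simp [runA, runB, firstRule, rulesB, matchB_star, matchB_q, matchB_eq, matchB_ne,
              matchB_nil, matchB_cons_nil, renderB, ofStr_one, hr, pyGet_one, slice_from_two]
            cases recB next <;> simp
          · have m1 : matchB ['9','E'] rest2 = false := by rw [matchB_noWild] <;> simp [h9]
            have m2 : matchB ['A','1'] rest2 = false := by rw [matchB_noWild] <;> simp [hA]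
            simp [runA, runB, firstRule, rulesB, matchB_star, matchB_q, matchB_eq, matchB_ne,
              matchB_nil, matchB_cons_nil, renderB, slice_from_two, h9, hA, m1, m2]
    by_cases eF : c0 = 'F'
    · subst eF
      cases rest with
      | nil =>
        simp [runA, runB, firstRule, rulesB, matchB_star, matchB_q, matchB_eq, matchB_ne,
          matchB_nil, matchB_cons_nil, renderB, slice_from_two]
      | cons c1 rest2 =>
        by_cases f1 : rest2 = ['0','7']
        · subst f1
          simp [runA, runB, firstRule, rulesB, matchB_star, matchB_q, matchB_eq, matchB_ne,
            matchB_nil, matchB_cons_nil, renderB, ofStr_one, pyGet_one, slice_from_two]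
        by_cases f2 : rest2 = ['0','A']
        · subst f2
          simp [runA, runB, firstRule, rulesB, matchB_star, matchB_q, matchB_eq, matchB_ne,
            matchB_nil, matchB_cons_nil, renderB, ofStr_one, pyGet_one, slice_from_two]
        by_cases f3 : rest2 = ['1','5']
        · subst f3
          simp [runA, runB, firstRule, rulesB, matchB_star, matchB_q, matchB_eq, matchB_ne,
            matchB_nil, matchB_cons_nil, renderB, ofStr_one, pyGet_one, slice_from_two]
        by_cases f4 : rest2 = ['1','8']
        · subst f4
          simp [runA, runB, firstRule, rulesB, matchB_star, matchB_q, matchB_eq, matchB_ne,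
            matchB_nil, matchB_cons_nil, renderB, ofStr_one, pyGet_one, slice_from_two]
        by_cases f5 : rest2 = ['1','E']
        · subst f5
          simp [runA, runB, firstRule, rulesB, matchB_star, matchB_q, matchB_eq, matchB_ne,
            matchB_nil, matchB_cons_nil, renderB, ofStr_one, pyGet_one, slice_from_two]
        by_cases f6 : rest2 = ['2','9']
        · subst f6
          simp [runA, runB, firstRule, rulesB, matchB_star, matchB_q, matchB_eq, matchB_ne,
            matchB_nil, matchB_cons_nil, renderB, ofStr_one, pyGet_one, slice_from_two]
        by_cases f7 : rest2 = ['3','3']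
        · subst f7
          simp [runA, runB, firstRule, rulesB, matchB_star, matchB_q, matchB_eq, matchB_ne,
            matchB_nil, matchB_cons_nil, renderB, ofStr_one, pyGet_one, slice_from_two]
        by_cases f8 : rest2 = ['5','5']
        · subst f8
          simp [runA, runB, firstRule, rulesB, matchB_star, matchB_q, matchB_eq, matchB_ne,
            matchB_nil, matchB_cons_nil, renderB, ofStr_one, pyGet_one, slice_from_two]
        by_cases f9 : rest2 = ['6','5']
        · subst f9
          simp [runA, runB, firstRule, rulesB, matchB_star, matchB_q, matchB_eq, matchB_ne,
            matchB_nil, matchB_cons_nil, renderB, ofStr_one, pyGet_one, slice_from_two]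
        · have m1 : matchB ['0','7'] rest2 = false := by rw [matchB_noWild] <;> simp [f1]
          have m2 : matchB ['0','A'] rest2 = false := by rw [matchB_noWild] <;> simp [f2]
          have m3 : matchB ['1','5'] rest2 = false := by rw [matchB_noWild] <;> simp [f3]
          have m4 : matchB ['1','8'] rest2 = false := by rw [matchB_noWild] <;> simp [f4]
          have m5 : matchB ['1','E'] rest2 = false := by rw [matchB_noWild] <;> simp [f5]
          have m6 : matchB ['2','9'] rest2 = false := by rw [matchB_noWild] <;> simp [f6]
          have m7 : matchB ['3','3'] rest2 = false := by rw [matchB_noWild] <;> simp [f7]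
          have m8 : matchB ['5','5'] rest2 = false := by rw [matchB_noWild] <;> simp [f8]
          have m9 : matchB ['6','5'] rest2 = false := by rw [matchB_noWild] <;> simp [f9]
          simp [runA, runB, firstRule, rulesB, matchB_star, matchB_q, matchB_eq, matchB_ne,
            matchB_nil, matchB_cons_nil, renderB, slice_from_two,
            f1, f2, f3, f4, f5, f6, f7, f8, f9, m1, m2, m3, m4, m5, m6, m7, m8, m9]
    · simp [runA, runB, firstRule, rulesB, matchB_star, matchB_q, matchB_eq, matchB_ne,
        matchB_nil, matchB_cons_nil, renderB,
        e0, e1, e2, e3, e4, e5, e6, e7, e8, e9, eA, eB, eC, eD, eE, eF,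
        Ne.symm e0, Ne.symm e1, Ne.symm e2, Ne.symm e3, Ne.symm e4, Ne.symm e5,
        Ne.symm e6, Ne.symm e7, Ne.symm e8, Ne.symm e9, Ne.symm eA, Ne.symm eB,
        Ne.symm eC, Ne.symm eD, Ne.symm eE, Ne.symm eF]

-- ===== VERDICT (by name: the statement is the Claim_ definition above) =====
theorem disasm_s_spec : Claim_equal_disasm_s := by
  intro s next_s _ hp
  unfold Spec_disasm_s disasm_s disasm_s_alt
  have : runA s.toList next_s.toList (fun t => runA t [] (fun _ => some []))
       = runB s.toList next_s.toList (fun t => runB t [] (fun _ => some [])) := by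
    apply run_eq _ _ _ _ _ hp
    intro hn
    exact run_eq _ _ _ _ (fun _ => rfl) (pyRet1_preL _ hn)
  rw [this]
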